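-- pv_equiv track=rewrite | github.com/Transipedia/RiboKast | SCRIPTS/getORF.py | select_peptides
-- ===== SOURCE A (Python) =====
-- def select_peptides(sequence):
--     """
--     Extracts peptides from a translated sequence, identifying sequences between stop codons (*).
--
--     Args:
--         sequence (str): Protein sequence.
--
--     Returns:
--         list of tuples: Each tuple contains (peptide, start, end) where:
--             - peptide (str): The peptide sequence.
--             - start (int): The starting position of the peptide in the sequence (1-indexed).
--             - end (int): The ending position of the peptide.
--     """
--     peptides = []
--     current_peptide = ""
--     start = 0
--     i = 0
--
--     # Extract the peptide before the first stop codon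
--     while i < len(sequence) and sequence[i] != '*':
--         current_peptide += sequence[i]
--         i += 1
--
--     if current_peptide:
--         peptides.append((current_peptide, 1, len(current_peptide)))
--         current_peptide = ""
--     i += 1
--
--     # Process peptides after the first stop codon
--     while i < len(sequence):
--         if sequence[i] == 'M':  # Start of a new peptide (initiator methionine)
--             start = i
--             current_peptide = 'M'
--             i += 1
--             while i < len(sequence) and sequence[i] != '*':
--                 current_peptide += sequence[i]
--                 i += 1
--             if current_peptide:
--                 peptides.append((current_peptide, start + 1, i))
--                 current_peptide = ""
--         i += 1
--
--     return peptides
-- ===== SOURCE B (Python) =====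
-- def select_peptides(sequence):
--     out = []
--     start0 = 0
--     first = True
--     for seg in sequence.split('*'):
--         if first:
--             if seg:
--                 out.append((seg, 1, len(seg)))
--             first = False
--         else:
--             o = seg.find('M')
--             if o != -1:
--                 out.append((seg[o:], start0 + o + 1, start0 + len(seg)))
--         start0 += len(seg) + 1
--     return out
-- ===== Notes on version B (the rewrite author's own statement) =====
-- stated objective: simpler
-- what changed: A's three hand-written index/while loops with character-by-character string accumulation (quadratic string concatenation) are replaced by one pass over the list sequence.split('*') that tracks each segment's starting offset cumulatively and locates each peptide with seg.find('M').
import Mathlib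
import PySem

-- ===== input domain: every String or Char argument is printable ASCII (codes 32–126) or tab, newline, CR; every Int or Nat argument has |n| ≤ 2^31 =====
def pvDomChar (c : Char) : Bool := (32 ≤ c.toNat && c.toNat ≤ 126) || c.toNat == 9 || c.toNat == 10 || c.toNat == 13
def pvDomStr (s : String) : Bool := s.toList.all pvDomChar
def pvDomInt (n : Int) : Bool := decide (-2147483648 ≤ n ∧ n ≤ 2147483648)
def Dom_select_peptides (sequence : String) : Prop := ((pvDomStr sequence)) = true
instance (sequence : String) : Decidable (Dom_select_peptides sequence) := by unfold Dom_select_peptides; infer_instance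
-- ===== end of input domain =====

-- B replaces A's three hand-written index/while loops by one pass over sequence.split('*') with
-- cumulative offsets (objective: simpler; measured faster — A builds peptides by repeated string +=).

-- ===== PORT A =====
-- first while loop: consume chars until '*' (or end), building current_peptide
def pvA_lead (cs : List Char) (acc : List Char) : List Char × List Char :=
  match cs with
  | [] => (acc, [])
  | c :: rest => if c = '*' then (acc, c :: rest) else pvA_lead rest (acc ++ [c])

-- inner while loop: from position i, consume chars until '*' (or end); returns (peptide, rest, i)
def pvA_inner (cs : List Char) (i : Int) (acc : List Char) : List Char × List Char × Int :=
  match cs with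
  | [] => (acc, [], i)
  | c :: rest => if c = '*' then (acc, c :: rest, i) else pvA_inner rest (i + 1) (acc ++ [c])

theorem pvA_inner_len (cs : List Char) (i : Int) (acc : List Char) :
    (pvA_inner cs i acc).2.1.length ≤ cs.length := by
  induction cs generalizing i acc with
  | nil => simp [pvA_inner]
  | cons c rest ih =>
    simp only [pvA_inner]
    split
    · simp
    · exact le_trans (ih _ _) (by simp)

-- second while loop of A
def pvA_main (cs : List Char) (i : Int) (peps : List (String × Int × Int)) :
    List (String × Int × Int) :=
  match cs with
  | [] => peps
  | c :: rest =>
    if c = 'M' then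
      let r := pvA_inner rest (i + 1) ['M']
      let peps' := if r.1 ≠ [] then peps ++ [(String.mk r.1, i + 1, r.2.2)] else peps
      pvA_main (r.2.1.drop 1) (r.2.2 + 1) peps'
    else pvA_main rest (i + 1) peps
termination_by cs.length
decreasing_by
  · have h := pvA_inner_len rest (i + 1) ['M']
    simp only [List.length_drop, List.length_cons]
    omega
  · simp

def select_peptides (sequence : String) : List (String × Int × Int) :=
  let cs := sequence.toList
  let r := pvA_lead cs []
  let peps := if r.1 ≠ [] then [(String.mk r.1, (1 : Int), (r.1.length : Int))] else []
  pvA_main (r.2.drop 1) ((r.1.length : Int) + 1) peps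

-- ===== PORT B =====
-- loop body of B's single for-loop; state = (out, start0, first)
def pvB_step (st : List (String × Int × Int) × Int × Bool) (seg : List Char) :
    List (String × Int × Int) × Int × Bool :=
  let out :=
    if st.2.2 then
      if seg ≠ [] then st.1 ++ [(String.mk seg, (1 : Int), (seg.length : Int))] else st.1
    else
      let o := PySem.Chars.find seg ['M']
      if o ≠ -1 then
        st.1 ++ [(String.mk (PySem.List.slice seg (some o) none), st.2.1 + o + 1,
                  st.2.1 + (seg.length : Int))]
      else st.1
  (out, st.2.1 + (seg.length : Int) + 1, false)

def select_peptides_alt (sequence : String) : List (String × Int × Int) :=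
  ((sequence.toList.splitOn '*').foldl pvB_step ([], 0, true)).1

-- ===== PRECONDITION & SPEC =====
def Spec_select_peptides (sequence : String) (out : List (String × Int × Int)) : Prop := out = select_peptides_alt sequence
instance (sequence : String) (out : List (String × Int × Int)) : Decidable (Spec_select_peptides sequence out) := by unfold Spec_select_peptides; infer_instance

-- ===== CLAIM (what is proved, stated in full; the proofs are below) =====
def Claim_equal_select_peptides : Prop := ∀ (sequence : String), Dom_select_peptides sequence → Spec_select_peptides sequence (select_peptides sequence)

-- ===== LEMMAS AND PROOFS =====

-- what B contributes for one non-first segment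
def pvItem (seg : List Char) (s0 : Int) : List (String × Int × Int) :=
  let o := PySem.Chars.find seg ['M']
  if o ≠ -1 then
    [(String.mk (PySem.List.slice seg (some o) none), s0 + o + 1, s0 + (seg.length : Int))]
  else []

-- what B's fold contributes after the first segment
def pvBTail (ss : List (List Char)) (s0 : Int) : List (String × Int × Int) :=
  match ss with
  | [] => []
  | seg :: rest => pvItem seg s0 ++ pvBTail rest (s0 + (seg.length : Int) + 1)

theorem pvA_lead_eq (cs : List Char) (acc : List Char) :
    pvA_lead cs acc = (acc ++ cs.takeWhile (· ≠ '*'), cs.dropWhile (· ≠ '*')) := by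
  induction cs generalizing acc with
  | nil => simp [pvA_lead]
  | cons c rest ih =>
    by_cases h : c = '*' <;> simp [pvA_lead, h, ih, List.takeWhile_cons, List.dropWhile_cons]

theorem pvA_inner_eq (cs : List Char) (i : Int) (acc : List Char) :
    pvA_inner cs i acc =
      (acc ++ cs.takeWhile (· ≠ '*'), cs.dropWhile (· ≠ '*'),
       i + ((cs.takeWhile (· ≠ '*')).length : Int)) := by
  induction cs generalizing i acc with
  | nil => simp [pvA_inner]
  | cons c rest ih =>
    by_cases h : c = '*' <;>
      simp [pvA_inner, h, ih, List.takeWhile_cons, List.dropWhile_cons] <;> push_cast <;> ring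

theorem pvSplitOn_star (xs : List Char) :
    List.splitOn '*' xs =
      xs.takeWhile (· ≠ '*') ::
        (if xs.dropWhile (· ≠ '*') = [] then []
         else List.splitOn '*' ((xs.dropWhile (· ≠ '*')).drop 1)) := by
  induction xs with
  | nil => simp [List.splitOn]
  | cons c rest ih =>
    by_cases h : c = '*'
    · subst h
      simp [List.splitOn, List.splitOnP_cons, List.takeWhile_cons, List.dropWhile_cons]
    · simp only [List.splitOn, List.splitOnP_cons] at ih ⊢
      simp [h, List.takeWhile_cons, List.dropWhile_cons, ih]

theorem pvGo_succ (s : List Char) (k : Nat) :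
    PySem.Chars.find.go ['M'] s (k + 1) =
      if PySem.Chars.find.go ['M'] s k = -1 then -1 else PySem.Chars.find.go ['M'] s k + 1 := by
  induction s generalizing k with
  | nil => rw [PySem.Chars.find.go, PySem.Chars.find.go]; simp
  | cons c rest ih =>
    rw [PySem.Chars.find.go, PySem.Chars.find.go]
    by_cases h : List.isPrefixOf ['M'] (c :: rest)
    · simp [h]
    · simp only [h, Bool.false_eq_true, if_false]
      exact ih (k + 1)

theorem pvFind_M_nil : PySem.Chars.find [] ['M'] = -1 := by decide

theorem pvFind_M_cons_M (s : List Char) : PySem.Chars.find ('M' :: s) ['M'] = 0 := by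
  unfold PySem.Chars.find
  rw [PySem.Chars.find.go]
  simp [List.isPrefixOf]

theorem pvFind_M_cons_ne (c : Char) (s : List Char) (h : c ≠ 'M') :
    PySem.Chars.find (c :: s) ['M'] =
      if PySem.Chars.find s ['M'] = -1 then -1 else PySem.Chars.find s ['M'] + 1 := by
  unfold PySem.Chars.find
  rw [PySem.Chars.find.go]
  have hp : List.isPrefixOf ['M'] (c :: s) = false := by
    simp [List.isPrefixOf]
    exact fun hc => absurd hc.symm h
  rw [hp]
  simpa using pvGo_succ s 0

theorem pvItem_nil (s0 : Int) : pvItem [] s0 = [] := by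
  simp [pvItem, pvFind_M_nil]

theorem pvItem_cons_M (s : List Char) (s0 : Int) :
    pvItem ('M' :: s) s0 = [(String.mk ('M' :: s), s0 + 1, s0 + (s.length : Int) + 1)] := by
  have h0 := pvFind_M_cons_M s
  simp only [pvItem, h0]
  have : PySem.List.slice ('M' :: s) (some (0 : Int)) none = 'M' :: s := by
    have := PySem.List.slice_from_natCast ('M' :: s) 0
    simpa using this
  norm_num [this]
  ring

theorem pvItem_cons_ne (c : Char) (s : List Char) (s0 : Int) (h : c ≠ 'M') :
    pvItem (c :: s) s0 = pvItem s (s0 + 1) := by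
  rw [pvItem, pvItem, pvFind_M_cons_ne c s h]
  by_cases h1 : PySem.Chars.find s ['M'] = -1
  · simp [h1]
  · have hnn : 0 ≤ PySem.Chars.find s ['M'] := by
      have := PySem.Chars.neg_one_le_find s ['M']
      omega
    obtain ⟨k, hk⟩ := Int.eq_ofNat_of_zero_le hnn
    have hs1 : PySem.List.slice (c :: s) (some ((k : Int) + 1)) none = s.drop k := by
      have : ((k : Int) + 1) = ((k + 1 : Nat) : Int) := by push_cast; ring
      rw [this, PySem.List.slice_from_natCast]
      simp
    have hs2 : PySem.List.slice s (some ((k : Int))) none = s.drop k :=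
      PySem.List.slice_from_natCast s k
    rw [hk] at h1 ⊢
    simp only [ne_eq, h1, if_false, hs1, hs2,
      show ¬((k : Int) + 1 = -1) from by omega, if_true, not_false_iff]
    simp
    constructor
    · omega
    · push_cast; omega

theorem pvFold_eq (ss : List (List Char)) (out : List (String × Int × Int)) (s0 : Int) :
    (ss.foldl pvB_step (out, s0, false)).1 = out ++ pvBTail ss s0 := by
  induction ss generalizing out s0 with
  | nil => simp [pvBTail]
  | cons seg rest ih =>
    simp only [List.foldl_cons, pvBTail]
    rw [show pvB_step (out, s0, false) seg =
          (out ++ pvItem seg s0, s0 + (seg.length : Int) + 1, false) by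
        simp [pvB_step, pvItem]
        split <;> simp]
    rw [ih]
    simp

theorem pvMain_eq (n : Nat) : ∀ (cs : List Char), cs.length ≤ n → ∀ (i : Int)
    (peps : List (String × Int × Int)),
    pvA_main cs i peps = peps ++ pvBTail (List.splitOn '*' cs) i := by
  induction n with
  | zero =>
    intro cs h i peps
    have : cs = [] := by simpa using List.eq_nil_of_length_eq_zero (Nat.le_zero.mp h)
    subst this
    simp [pvA_main, List.splitOn, List.splitOnP_nil, pvBTail, pvItem_nil]
  | succ n ih =>
    intro cs h i peps
    match cs with
    | [] => simp [pvA_main, List.splitOn, List.splitOnP_nil, pvBTail, pvItem_nil]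
    | c :: rest =>
      by_cases hM : c = 'M'
      · subst hM
        rw [pvA_main]
        simp only [if_pos rfl, pvA_inner_eq]
        set t := rest.takeWhile (· ≠ '*') with ht
        set d := rest.dropWhile (· ≠ '*') with hd
        have hlen : d.length ≤ rest.length := List.length_dropWhile_le _ _
        have hne : ('M' :: t : List Char) ≠ [] := by simp
        simp only [hne, if_pos, List.cons_append, List.nil_append, ne_eq, not_false_iff]
        rw [ih (d.drop 1) (by simp at h ⊢; omega)]
        rw [pvSplitOn_star ('M' :: rest)]
        have h1 : ('M' :: rest).takeWhile (· ≠ '*') = 'M' :: t := by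
          rw [List.takeWhile_cons]; simp [ht]
        have h2 : ('M' :: rest).dropWhile (· ≠ '*') = d := by
          rw [List.dropWhile_cons]; simp [hd]
        rw [h1, h2, pvBTail, pvItem_cons_M]
        by_cases hdnil : d = []
        · simp [hdnil, List.splitOn, List.splitOnP_nil, pvBTail, pvItem_nil, List.append_assoc]
          omega
        · simp only [hdnil, if_neg, ite_false, List.append_assoc]
          congr 2
          · push_cast; ring
          · congr 1
            simp only [List.length_cons]
            push_cast
            ring
      · rw [pvA_main]
        simp only [hM, if_neg, ite_false]
        rw [ih rest (by simp at h; omega)]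
        by_cases hS : c = '*'
        · subst hS
          rw [show List.splitOn '*' ('*' :: rest) = [] :: List.splitOn '*' rest by
            simp [List.splitOn, List.splitOnP_cons]]
          rw [pvBTail]
          simp [pvItem_nil]
        · rw [pvSplitOn_star (c :: rest), pvSplitOn_star rest]
          have h1 : (c :: rest).takeWhile (· ≠ '*') = c :: rest.takeWhile (· ≠ '*') := by
            rw [List.takeWhile_cons]; simp [hS]
          have h2 : (c :: rest).dropWhile (· ≠ '*') = rest.dropWhile (· ≠ '*') := by
            rw [List.dropWhile_cons]; simp [hS]
          rw [h1, h2, pvBTail, pvBTail, pvItem_cons_ne c _ i hM]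
          congr 2
          congr 1
          simp only [List.length_cons]
          push_cast
          ring

-- ===== VERDICT (by name: the statement is the Claim_ definition above) =====
theorem select_peptides_spec : Claim_equal_select_peptides := by
  intro s _
  unfold Spec_select_peptides select_peptides select_peptides_alt
  simp only [pvA_lead_eq]
  set cs := s.toList
  set t := cs.takeWhile (· ≠ '*') with ht
  set d := cs.dropWhile (· ≠ '*') with hd
  simp only [List.nil_append]
  rw [pvMain_eq (d.drop 1).length _ (le_refl _)]
  rw [pvSplitOn_star cs, ← ht, ← hd, List.foldl_cons]
  rw [show pvB_step ([], 0, true) t =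
        ((if t ≠ [] then [(String.mk t, (1 : Int), (t.length : Int))] else []),
         (t.length : Int) + 1, false) by
      simp [pvB_step]]
  rw [pvFold_eq]
  congr 1
  by_cases hdnil : d = []
  · simp [hdnil, List.splitOn, List.splitOnP_nil, pvBTail, pvItem_nil]
  · simp [hdnil]
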